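-- pv_equiv track=rewrite | github.com/jlsh29/warm-intro-finder | farcaster_hub_ingester.py | build_mutual_edges
-- ===== SOURCE A (Python) =====
-- def build_mutual_edges(seen_following: dict[int, set[int]],
--                        kept: set[int]) -> list[tuple[int, int]]:
--     """Return sorted-pair list of mutual-follow edges among kept FIDs."""
--     edges: set[tuple[int, int]] = set()
--     for a, follows_a in seen_following.items():
--         if a not in kept:
--             continue
--         for b in follows_a:
--             if b not in kept:
--                 continue
--             # Mutual if we ALSO observed b's following set and a is in it.
--             follows_b = seen_following.get(b)
--             if follows_b is not None and a in follows_b: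
--                 pair = (a, b) if a < b else (b, a)
--                 edges.add(pair)
--     return sorted(edges)
-- ===== SOURCE B (Python) =====
-- def build_mutual_edges(seen_following: dict[int, set[int]],
--                        kept: set[int]) -> list[tuple[int, int]]:
--     """Two-pass: first collect every kept->kept directed follow edge,
--     then keep exactly the reciprocated ones as canonical (min, max) pairs."""
--     directed: set[tuple[int, int]] = set()
--     for a, follows_a in seen_following.items():
--         if a in kept:
--             for b in follows_a:
--                 if b in kept:
--                     directed.add((a, b))
--     edges: set[tuple[int, int]] = set()
--     for a, b in directed:
--         if (b, a) in directed:
--             edges.add((min(a, b), max(a, b)))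
--     return sorted(edges)
-- ===== Notes on version B (the rewrite author's own statement) =====
-- stated objective: alternative
-- what changed: Replaces the fused nested loop that probes the dict for each candidate with two passes: first build the set of all kept->kept directed follow edges, then keep a canonical (min,max) pair exactly when the reverse directed edge is also present; Pre_ only excludes association lists with duplicate keys, which do not represent a Python dict (A's first-match lookup vs B's any-occurrence reverse test would diverge only there).
import Mathlib
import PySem

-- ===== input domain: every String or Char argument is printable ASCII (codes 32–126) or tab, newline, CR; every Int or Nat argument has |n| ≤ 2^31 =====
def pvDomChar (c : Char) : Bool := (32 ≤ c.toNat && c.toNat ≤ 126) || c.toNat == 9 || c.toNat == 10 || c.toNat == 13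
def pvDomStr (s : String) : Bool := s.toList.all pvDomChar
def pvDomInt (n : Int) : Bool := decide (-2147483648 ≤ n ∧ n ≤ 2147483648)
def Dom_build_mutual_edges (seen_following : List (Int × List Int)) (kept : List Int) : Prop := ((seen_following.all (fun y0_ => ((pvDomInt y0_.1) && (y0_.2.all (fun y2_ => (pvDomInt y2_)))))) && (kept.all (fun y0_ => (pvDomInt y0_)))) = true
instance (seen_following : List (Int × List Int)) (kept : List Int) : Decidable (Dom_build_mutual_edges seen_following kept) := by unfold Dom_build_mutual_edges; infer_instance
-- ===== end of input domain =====

-- B replaces the fused nested loop with dict probe by two passes (collect all kept->kept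
-- directed edges, then keep the reciprocated ones); objective: alternative decomposition.

-- ===== PORT A =====
def build_mutual_edges (seen_following : List (Int × List Int)) (kept : List Int) : List (Int × Int) :=
  let edges : PySem.Set (Int × Int) :=
    seen_following.foldl (fun edges p =>
      if p.1 ∈ kept then
        p.2.foldl (fun edges b =>
          if b ∈ kept then
            match (PySem.Dict.mk seen_following).get? b with
            | some follows_b =>
                if p.1 ∈ follows_b then
                  PySem.Set.add edges (if p.1 < b then (p.1, b) else (b, p.1))
                else edges
            | none => edges
          else edges) edges
      else edges) PySem.Set.empty
  PySem.List.sorted2 edges Prod.fst Prod.snd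

-- ===== PORT B =====
def build_mutual_edges_alt (seen_following : List (Int × List Int)) (kept : List Int) : List (Int × Int) :=
  let directed : PySem.Set (Int × Int) :=
    seen_following.foldl (fun d p =>
      if p.1 ∈ kept then
        p.2.foldl (fun d b => if b ∈ kept then PySem.Set.add d (p.1, b) else d) d
      else d) PySem.Set.empty
  let edges : PySem.Set (Int × Int) :=
    directed.foldl (fun es q =>
      if (q.2, q.1) ∈ directed then PySem.Set.add es (min q.1 q.2, max q.1 q.2) else es)
      PySem.Set.empty
  PySem.List.sorted2 edges Prod.fst Prod.snd

-- ===== PRECONDITION & SPEC =====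
-- Pre_ only excludes association lists with a repeated key: those do not represent any
-- Python dict (dict keys are unique), so no input of the Python function is lost.
def Pre_build_mutual_edges (seen_following : List (Int × List Int)) (kept : List Int) : Prop :=
  (seen_following.map Prod.fst).Nodup
instance (seen_following : List (Int × List Int)) (kept : List Int) : Decidable (Pre_build_mutual_edges seen_following kept) := by unfold Pre_build_mutual_edges; infer_instance
def pvWitness_build_mutual_edges : (List (Int × List Int)) × List Int := ([(1, [2]), (2, [1, 3]), (3, [2])], [1, 2])

def Spec_build_mutual_edges (seen_following : List (Int × List Int)) (kept : List Int) (out : List (Int × Int)) : Prop := out = build_mutual_edges_alt seen_following kept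
instance (seen_following : List (Int × List Int)) (kept : List Int) (out : List (Int × Int)) : Decidable (Spec_build_mutual_edges seen_following kept out) := by unfold Spec_build_mutual_edges; infer_instance

-- ===== CLAIM (what is proved, stated in full; the proofs are below) =====
def Claim_equal_build_mutual_edges : Prop := ∀ (seen_following : List (Int × List Int)) (kept : List Int), Dom_build_mutual_edges seen_following kept → Pre_build_mutual_edges seen_following kept → Spec_build_mutual_edges seen_following kept (build_mutual_edges seen_following kept)

-- ===== LEMMAS AND PROOFS =====

-- generic membership characterisation of a 'for' loop that conditionally adds to a set
theorem pv_mem_foldl_iff {α β : Type} [BEq β] (g : PySem.Set β → α → PySem.Set β)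
    (Q : α → β → Prop) (h : ∀ s x y, y ∈ g s x ↔ y ∈ s ∨ Q x y) :
    ∀ (xs : List α) (s0 : PySem.Set β) (y : β),
      y ∈ xs.foldl g s0 ↔ y ∈ s0 ∨ ∃ x ∈ xs, Q x y := by
  intro xs
  induction xs with
  | nil => intro s0 y; simp
  | cons x xs ih =>
    intro s0 y
    simp only [List.foldl_cons, ih, h, List.mem_cons]
    constructor
    · rintro ((hy | hq) | ⟨z, hz, hq⟩)
      · exact Or.inl hy
      · exact Or.inr ⟨x, Or.inl rfl, hq⟩
      · exact Or.inr ⟨z, Or.inr hz, hq⟩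
    · rintro (hy | ⟨z, (rfl | hz), hq⟩)
      · exact Or.inl (Or.inl hy)
      · exact Or.inl (Or.inr hq)
      · exact Or.inr ⟨z, hz, hq⟩

theorem pv_nodup_foldl {α β : Type} [BEq β] (g : PySem.Set β → α → PySem.Set β)
    (h : ∀ s x, s.Nodup → (g s x).Nodup) :
    ∀ (xs : List α) (s0 : PySem.Set β), s0.Nodup → (xs.foldl g s0).Nodup := by
  intro xs
  induction xs with
  | nil => intro s0 h0; simpa using h0
  | cons x xs ih => intro s0 h0; exact ih _ (h _ _ h0)

-- first-match lookup in an assoc list with distinct keys is exactly membership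
theorem pv_get?_iff_mem (sf : List (Int × List Int)) (hk : (sf.map Prod.fst).Nodup)
    (b : Int) (fb : List Int) :
    (PySem.Dict.mk sf).get? b = some fb ↔ (b, fb) ∈ sf := by
  induction sf with
  | nil => simp [PySem.Dict.get?]
  | cons p sf ih =>
    obtain ⟨k, v⟩ := p
    simp only [List.map_cons, List.nodup_cons, List.mem_map] at hk
    rw [PySem.Dict.get?_mk_cons]
    by_cases hpb : k = b
    · subst hpb
      simp only [beq_self_eq_true, if_true, Option.some_inj, List.mem_cons]
      constructor
      · rintro rfl; exact Or.inl rfl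
      · rintro (h | h)
        · injection h with h1 h2; exact h2.symm
        · exact absurd ⟨(k, fb), h, rfl⟩ hk.1
    · simp only [beq_iff_eq, hpb, if_false, ih hk.2, List.mem_cons]
      constructor
      · exact Or.inr
      · rintro (h | h)
        · injection h with h1 h2; exact absurd h1.symm hpb
        · exact h

-- the boolean lexicographic order used by sorted2 on Int pairs
def pvLt (a b : Int × Int) : Bool :=
  decide (a.1 < b.1) || (!decide (b.1 < a.1) && decide (a.2 < b.2))

theorem pvLt_true_iff (a b : Int × Int) :
    pvLt a b = true ↔ (a.1 < b.1 ∨ (¬ b.1 < a.1 ∧ a.2 < b.2)) := by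
  simp only [pvLt, Bool.or_eq_true, Bool.and_eq_true, Bool.not_eq_true',
    decide_eq_true_eq, decide_eq_false_iff_not]

theorem pvLt_false_iff (a b : Int × Int) :
    pvLt a b = false ↔ ¬ (a.1 < b.1 ∨ (¬ b.1 < a.1 ∧ a.2 < b.2)) := by
  rw [← pvLt_true_iff, Bool.eq_false_iff]

theorem pv_sorted2_eq_foldl (xs : List (Int × Int)) :
    PySem.List.sorted2 xs Prod.fst Prod.snd false
      = xs.foldl (fun acc x => PySem.List.insertBy pvLt x acc) [] := rfl

theorem pv_insertBy_pairwise (x : Int × Int) (ys : List (Int × Int))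
    (hp : ys.Pairwise (fun a b => pvLt b a = false)) :
    (PySem.List.insertBy pvLt x ys).Pairwise (fun a b => pvLt b a = false) := by
  induction ys with
  | nil => simp [PySem.List.insertBy]
  | cons y ys ih =>
    rw [List.pairwise_cons] at hp
    by_cases hxy : pvLt x y = true
    · have hins : PySem.List.insertBy pvLt x (y :: ys) = x :: y :: ys := by
        simp [PySem.List.insertBy, hxy]
      rw [hins, List.pairwise_cons]
      refine ⟨?_, List.pairwise_cons.2 hp⟩
      intro z hz
      rw [pvLt_true_iff] at hxy
      rcases List.mem_cons.1 hz with rfl | hz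
      · rw [pvLt_false_iff]; omega
      · have hzy := hp.1 z hz
        rw [pvLt_false_iff] at hzy ⊢
        omega
    · have hins : PySem.List.insertBy pvLt x (y :: ys)
          = y :: PySem.List.insertBy pvLt x ys := by
        simp [PySem.List.insertBy, hxy]
      rw [hins, List.pairwise_cons]
      refine ⟨?_, ih hp.2⟩
      intro z hz
      rcases (PySem.List.mem_insertBy pvLt x z ys).mp hz with rfl | hz'
      · exact Bool.eq_false_iff.mpr hxy
      · exact hp.1 z hz'

theorem pv_foldl_insertBy_pairwise (xs : List (Int × Int)) :
    (xs.foldl (fun acc x => PySem.List.insertBy pvLt x acc) []).Pairwise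
      (fun a b => pvLt b a = false) := by
  suffices h : ∀ (acc : List (Int × Int)), acc.Pairwise (fun a b => pvLt b a = false) →
      (xs.foldl (fun acc x => PySem.List.insertBy pvLt x acc) acc).Pairwise
        (fun a b => pvLt b a = false) from h [] (by simp)
  induction xs with
  | nil => intro acc h; simpa using h
  | cons x xs ih => intro acc h; exact ih _ (pv_insertBy_pairwise x acc h)

-- two nodup lists with the same elements have the same sorted2 output
theorem pv_sorted2_eq_of_same (xs ys : List (Int × Int)) (hx : xs.Nodup) (hy : ys.Nodup)
    (hmem : ∀ p, p ∈ xs ↔ p ∈ ys) :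
    PySem.List.sorted2 xs Prod.fst Prod.snd false
      = PySem.List.sorted2 ys Prod.fst Prod.snd false := by
  have pxs := pv_foldl_insertBy_pairwise xs
  have pys := pv_foldl_insertBy_pairwise ys
  have permx := PySem.List.sorted2_perm xs Prod.fst Prod.snd false
  have permy := PySem.List.sorted2_perm ys Prod.fst Prod.snd false
  rw [pv_sorted2_eq_foldl] at permx permy ⊢
  have hperm : (xs.foldl (fun acc x => PySem.List.insertBy pvLt x acc) []).Perm
      (ys.foldl (fun acc x => PySem.List.insertBy pvLt x acc) []) :=
    permx.trans ((List.perm_ext_iff_of_nodup hx hy).2 hmem |>.trans permy.symm)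
  refine List.Perm.eq_of_pairwise ?_ pxs pys hperm
  intro a b _ _ h1 h2
  rw [pvLt_false_iff] at h1 h2
  have he : a.1 = b.1 ∧ a.2 = b.2 := by omega
  exact Prod.ext he.1 he.2

-- membership characterisations of the loops of the two ports
theorem pv_mem_edgesA (sf : List (Int × List Int)) (kept : List Int) (y : Int × Int) :
    (y ∈ sf.foldl (fun edges p =>
      if p.1 ∈ kept then
        p.2.foldl (fun edges b =>
          if b ∈ kept then
            match (PySem.Dict.mk sf).get? b with
            | some follows_b =>
                if p.1 ∈ follows_b then
                  PySem.Set.add edges (if p.1 < b then (p.1, b) else (b, p.1))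
                else edges
            | none => edges
          else edges) edges
      else edges) PySem.Set.empty)
    ↔ ∃ p ∈ sf, p.1 ∈ kept ∧ ∃ b ∈ p.2, b ∈ kept ∧
        (∃ fb, (PySem.Dict.mk sf).get? b = some fb ∧ p.1 ∈ fb) ∧
        y = (if p.1 < b then (p.1, b) else (b, p.1)) := by
  rw [pv_mem_foldl_iff _ (fun p y => p.1 ∈ kept ∧ ∃ b ∈ p.2, b ∈ kept ∧
        (∃ fb, (PySem.Dict.mk sf).get? b = some fb ∧ p.1 ∈ fb) ∧
        y = (if p.1 < b then (p.1, b) else (b, p.1)))]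
  · simp [PySem.Set.empty]
  · intro s p z
    by_cases hp : p.1 ∈ kept
    · simp only [hp, if_true, true_and]
      rw [pv_mem_foldl_iff _ (fun b z => b ∈ kept ∧
            (∃ fb, (PySem.Dict.mk sf).get? b = some fb ∧ p.1 ∈ fb) ∧
            z = (if p.1 < b then (p.1, b) else (b, p.1)))]
      intro s b z
      by_cases hb : b ∈ kept
      · simp only [hb, if_true, true_and]
        cases hget : (PySem.Dict.mk sf).get? b with
        | none => simp
        | some fb =>
          by_cases hin : p.1 ∈ fb
          · simp only [hin, if_true, PySem.Set.mem_add]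
            constructor
            · rintro (h | rfl)
              · exact Or.inl h
              · exact Or.inr ⟨⟨fb, rfl, hin⟩, rfl⟩
            · rintro (h | ⟨⟨fb', hfb', hin'⟩, rfl⟩)
              · exact Or.inl h
              · exact Or.inr rfl
          · simp only [hin, if_false]
            constructor
            · exact Or.inl
            · rintro (h | ⟨⟨fb', hfb', hin'⟩, rfl⟩)
              · exact h
              · injection hfb' with hfbeq; subst hfbeq; exact absurd hin' hin
      · simp [hb]
    · simp [hp]

theorem pv_mem_directed (sf : List (Int × List Int)) (kept : List Int) (y : Int × Int) :
    (y ∈ sf.foldl (fun d p =>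
      if p.1 ∈ kept then
        p.2.foldl (fun d b => if b ∈ kept then PySem.Set.add d (p.1, b) else d) d
      else d) PySem.Set.empty)
    ↔ ∃ p ∈ sf, p.1 ∈ kept ∧ ∃ b ∈ p.2, b ∈ kept ∧ y = (p.1, b) := by
  rw [pv_mem_foldl_iff _ (fun p y => p.1 ∈ kept ∧ ∃ b ∈ p.2, b ∈ kept ∧ y = (p.1, b))]
  · simp [PySem.Set.empty]
  · intro s p z
    by_cases hp : p.1 ∈ kept
    · simp only [hp, if_true, true_and]
      rw [pv_mem_foldl_iff _ (fun b z => b ∈ kept ∧ z = (p.1, b))]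
      intro s b z
      by_cases hb : b ∈ kept
      · simp [hb, PySem.Set.mem_add]
      · simp [hb]
    · simp [hp]

theorem pv_nodup_edgesA (sf : List (Int × List Int)) (kept : List Int) :
    (sf.foldl (fun edges p =>
      if p.1 ∈ kept then
        p.2.foldl (fun edges b =>
          if b ∈ kept then
            match (PySem.Dict.mk sf).get? b with
            | some follows_b =>
                if p.1 ∈ follows_b then
                  PySem.Set.add edges (if p.1 < b then (p.1, b) else (b, p.1))
                else edges
            | none => edges
          else edges) edges
      else edges) PySem.Set.empty).Nodup := by
  refine pv_nodup_foldl _ ?_ sf PySem.Set.empty (by simp [PySem.Set.empty])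
  intro s p hs
  by_cases hp : p.1 ∈ kept
  · simp only [hp, if_true]
    refine pv_nodup_foldl _ ?_ p.2 s hs
    intro s b hsb
    by_cases hb : b ∈ kept
    · simp only [hb, if_true]
      cases hget : (PySem.Dict.mk sf).get? b with
      | none => exact hsb
      | some fb =>
        by_cases hin : p.1 ∈ fb
        · simp only [hin, if_true]; exact PySem.Set.nodup_add _ _ hsb
        · simpa [hin] using hsb
    · simpa [hb] using hsb
  · simpa [hp] using hs

theorem pv_mem_edgesB_of_directed (directed : PySem.Set (Int × Int)) (y : Int × Int) :
    (y ∈ directed.foldl (fun es q =>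
      if (q.2, q.1) ∈ directed then PySem.Set.add es (min q.1 q.2, max q.1 q.2) else es)
      PySem.Set.empty)
    ↔ ∃ q ∈ directed, (q.2, q.1) ∈ directed ∧ y = (min q.1 q.2, max q.1 q.2) := by
  rw [pv_mem_foldl_iff _ (fun q y => (q.2, q.1) ∈ directed ∧ y = (min q.1 q.2, max q.1 q.2))]
  · simp [PySem.Set.empty]
  · intro s q z
    by_cases hq : (q.2, q.1) ∈ directed
    · simp [hq, PySem.Set.mem_add]
    · simp [hq]

theorem pv_nodup_edgesB_of_directed (directed : PySem.Set (Int × Int)) :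
    (directed.foldl (fun es q =>
      if (q.2, q.1) ∈ directed then PySem.Set.add es (min q.1 q.2, max q.1 q.2) else es)
      PySem.Set.empty).Nodup := by
  refine pv_nodup_foldl _ ?_ directed PySem.Set.empty (by simp [PySem.Set.empty])
  intro s q hs
  by_cases hq : (q.2, q.1) ∈ directed
  · simp only [hq, if_true]; exact PySem.Set.nodup_add _ _ hs
  · simpa [hq] using hs

-- ===== VERDICT (by name: the statement is the Claim_ definition above) =====
theorem build_mutual_edges_spec : Claim_equal_build_mutual_edges := by
  intro sf kept _hdom hpre
  unfold Spec_build_mutual_edges build_mutual_edges build_mutual_edges_alt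
  apply pv_sorted2_eq_of_same
  · exact pv_nodup_edgesA sf kept
  · exact pv_nodup_edgesB_of_directed _
  · intro y
    rw [pv_mem_edgesA, pv_mem_edgesB_of_directed]
    constructor
    · rintro ⟨⟨a, fa⟩, hmem, ha, b, hb, hbk, ⟨fb, hget, hafb⟩, rfl⟩
      refine ⟨(a, b), ?_, ?_, ?_⟩
      · exact (pv_mem_directed sf kept (a, b)).2 ⟨(a, fa), hmem, ha, b, hb, hbk, rfl⟩
      · exact (pv_mem_directed sf kept (b, a)).2
          ⟨(b, fb), (pv_get?_iff_mem sf hpre b fb).1 hget, hbk, a, hafb, ha, rfl⟩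
      · split_ifs with h
        · have h1 : min a b = a := by omega
          have h2 : max a b = b := by omega
          rw [h1, h2]
        · have h1 : min a b = b := by omega
          have h2 : max a b = a := by omega
          rw [h1, h2]
    · rintro ⟨⟨a, b⟩, hd1, hd2, rfl⟩
      obtain ⟨⟨a', fa⟩, hmem, ha, b', hb', hbk, heq⟩ := (pv_mem_directed sf kept (a, b)).1 hd1
      injection heq with e1 e2
      subst e1; subst e2
      obtain ⟨⟨b'', fb⟩, hmem2, hbk2, a'', ha'', hak2, heq2⟩ :=
        (pv_mem_directed sf kept (b, a)).1 hd2
      injection heq2 with e3 e4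
      subst e3; subst e4
      refine ⟨(a, fa), hmem, ha, b, hb', hbk,
        ⟨fb, (pv_get?_iff_mem sf hpre b fb).2 hmem2, ha''⟩, ?_⟩
      split_ifs with h
      · have h1 : min a b = a := by omega
        have h2 : max a b = b := by omega
        rw [h1, h2]
      · have h1 : min a b = b := by omega
        have h2 : max a b = a := by omega
        rw [h1, h2]
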